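-- pv_equiv track=rewrite | github.com/Javzaa939/koosen | backend/main/utils/function/utils.py | check_phone_number
-- ===== SOURCE A (Python) =====
-- def check_phone_number(phone_numbers):
--     """Утасны дугаарын үүрэн телефон шалгах
--        phone_numbers: Шалгаж буй утасны дугаарууд (list)
--     """
--
--     #үүрэн телефон
--     categorized_numbers = {
--         'mobicom': [],
--         'skytel': [],
--         'unitel': [],
--         'gmobile': [],
--         'other': []
--     }
--
--     for phone_number in phone_numbers:
--
--         # Эхний 2 орон
--         two_digits = phone_number[:2]
--
--         if two_digits in ["99", "85", "95", "94"]: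
--             categorized_numbers['mobicom'].append(phone_number)
--         elif two_digits in ["90", "91", "96"]:
--             categorized_numbers['skytel'].append(phone_number)
--         elif two_digits in ["80", "86", "88", "89"]:
--             categorized_numbers['unitel'].append(phone_number)
--         elif two_digits in ["93", "97", "98"]:
--             categorized_numbers['gmobile'].append(phone_number)
--         else:
--             categorized_numbers['other'].append(phone_number)
--
--     # Хоосон массив хаях
--     categorized_numbers = {k: v for k, v in categorized_numbers.items() if v}
--
--     return categorized_numbers
-- ===== SOURCE B (Python) =====
-- _CARRIER_PREFIXES = (
--     ('mobicom', ('99', '85', '95', '94')),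
--     ('skytel', ('90', '91', '96')),
--     ('unitel', ('80', '86', '88', '89')),
--     ('gmobile', ('93', '97', '98')),
-- )
--
--
-- def _carrier(phone_number):
--     two_digits = phone_number[:2]
--     for name, prefixes in _CARRIER_PREFIXES:
--         if two_digits in prefixes:
--             return name
--     return 'other'
--
--
-- def check_phone_number(phone_numbers):
--     """Утасны дугаарын үүрэн телефон шалгах
--        phone_numbers: Шалгаж буй утасны дугаарууд (list)
--     """
--     result = {}
--     for name in ('mobicom', 'skytel', 'unitel', 'gmobile', 'other'):
--         bucket = [p for p in phone_numbers if _carrier(p) == name]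
--         if bucket:
--             result[name] = bucket
--     return result
-- ===== Notes on version B (the rewrite author's own statement) =====
-- stated objective: alternative
-- what changed: Instead of one pass distributing each number into a pre-built five-bucket dict via an if/elif chain and then dropping empty buckets, B classifies via a prefix table and builds each carrier's bucket directly with one filter pass per carrier, inserting only non-empty buckets.
import Mathlib
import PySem

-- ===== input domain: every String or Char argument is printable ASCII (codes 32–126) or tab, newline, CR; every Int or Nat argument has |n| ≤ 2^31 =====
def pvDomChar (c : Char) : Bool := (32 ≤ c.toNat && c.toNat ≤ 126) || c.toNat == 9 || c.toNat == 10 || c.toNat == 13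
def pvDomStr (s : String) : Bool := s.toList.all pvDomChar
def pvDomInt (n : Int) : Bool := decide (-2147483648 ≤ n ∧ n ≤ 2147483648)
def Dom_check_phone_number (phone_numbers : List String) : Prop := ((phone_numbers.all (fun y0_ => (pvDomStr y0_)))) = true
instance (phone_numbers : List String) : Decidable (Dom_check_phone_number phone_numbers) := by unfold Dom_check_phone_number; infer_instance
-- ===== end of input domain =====

-- B replaces A's single distributing loop (if/elif chain into a pre-seeded dict, then dropping
-- empty buckets) by a prefix-table classifier and one filter pass per carrier; alternative, not faster.

-- ===== PORT A =====
-- one iteration of A's for-loop: slice the first two chars, if/elif chain, append to the bucket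
def pvAStep (d : PySem.Dict String (List String)) (phone_number : String) : PySem.Dict String (List String) :=
  let two_digits := PySem.Str.slice phone_number none (some 2)
  if two_digits ∈ ["99", "85", "95", "94"] then d.modify "mobicom" [] (· ++ [phone_number])
  else if two_digits ∈ ["90", "91", "96"] then d.modify "skytel" [] (· ++ [phone_number])
  else if two_digits ∈ ["80", "86", "88", "89"] then d.modify "unitel" [] (· ++ [phone_number])
  else if two_digits ∈ ["93", "97", "98"] then d.modify "gmobile" [] (· ++ [phone_number])
  else d.modify "other" [] (· ++ [phone_number])

def check_phone_number (phone_numbers : List String) : List (String × List String) :=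
  let categorized : PySem.Dict String (List String) :=
    (((((PySem.Dict.empty.insert "mobicom" []).insert "skytel" []).insert "unitel" []).insert
        "gmobile" []).insert "other" [])
  let categorized := phone_numbers.foldl pvAStep categorized
  (categorized.items.filter (fun kv => !kv.2.isEmpty))

-- ===== PORT B =====
def pvCarrierPrefixes : List (String × List String) :=
  [("mobicom", ["99", "85", "95", "94"]),
   ("skytel", ["90", "91", "96"]),
   ("unitel", ["80", "86", "88", "89"]),
   ("gmobile", ["93", "97", "98"])]

-- the for-loop of _carrier: first table row whose prefix list contains the two digits
def pvCarrierGo (two_digits : String) : List (String × List String) → String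
  | [] => "other"
  | (name, prefixes) :: rest =>
      if two_digits ∈ prefixes then name else pvCarrierGo two_digits rest

def pvCarrier (phone_number : String) : String :=
  pvCarrierGo (PySem.Str.slice phone_number none (some 2)) pvCarrierPrefixes

def check_phone_number_alt (phone_numbers : List String) : List (String × List String) :=
  ["mobicom", "skytel", "unitel", "gmobile", "other"].foldl
    (fun result name =>
      let bucket := phone_numbers.filter (fun p => pvCarrier p == name)
      if bucket.isEmpty then result else result ++ [(name, bucket)])
    []

-- ===== PRECONDITION & SPEC =====
def Spec_check_phone_number (phone_numbers : List String) (out : List (String × List String)) : Prop := out = check_phone_number_alt phone_numbers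
instance (phone_numbers : List String) (out : List (String × List String)) : Decidable (Spec_check_phone_number phone_numbers out) := by unfold Spec_check_phone_number; infer_instance

-- ===== CLAIM (what is proved, stated in full; the proofs are below) =====
def Claim_equal_check_phone_number : Prop := ∀ (phone_numbers : List String), Dom_check_phone_number phone_numbers → Spec_check_phone_number phone_numbers (check_phone_number phone_numbers)

-- ===== LEMMAS AND PROOFS =====

-- after A's loop from a generic 5-bucket state, each bucket holds its old content
-- followed by the phone numbers pvCarrier classifies into it, in order
theorem pvFoldA (xs : List String) (a b c d e : List String) :
    xs.foldl pvAStep (PySem.Dict.mk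
      [("mobicom", a), ("skytel", b), ("unitel", c), ("gmobile", d), ("other", e)])
    = PySem.Dict.mk
      [("mobicom", a ++ xs.filter (fun p => pvCarrier p == "mobicom")),
       ("skytel", b ++ xs.filter (fun p => pvCarrier p == "skytel")),
       ("unitel", c ++ xs.filter (fun p => pvCarrier p == "unitel")),
       ("gmobile", d ++ xs.filter (fun p => pvCarrier p == "gmobile")),
       ("other", e ++ xs.filter (fun p => pvCarrier p == "other"))] := by
  induction xs generalizing a b c d e with
  | nil => simp
  | cons p xs ih =>
      simp only [List.foldl_cons, List.filter_cons]
      by_cases h1 : PySem.Str.slice p none (some 2) ∈ ["99", "85", "95", "94"]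
      · rw [show pvAStep (PySem.Dict.mk
            [("mobicom", a), ("skytel", b), ("unitel", c), ("gmobile", d), ("other", e)]) p
            = PySem.Dict.mk [("mobicom", a ++ [p]), ("skytel", b), ("unitel", c),
                ("gmobile", d), ("other", e)] by
            simp [pvAStep, h1, PySem.Dict.modify, PySem.Dict.getD, PySem.Dict.get?_mk_cons, PySem.Dict.insert, PySem.Dict.contains]]
        rw [ih]
        simp [pvCarrier, pvCarrierPrefixes, pvCarrierGo, h1]
      · by_cases h2 : PySem.Str.slice p none (some 2) ∈ ["90", "91", "96"]
        · rw [show pvAStep (PySem.Dict.mk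
              [("mobicom", a), ("skytel", b), ("unitel", c), ("gmobile", d), ("other", e)]) p
              = PySem.Dict.mk [("mobicom", a), ("skytel", b ++ [p]), ("unitel", c),
                  ("gmobile", d), ("other", e)] by
              simp [pvAStep, h1, h2, PySem.Dict.modify, PySem.Dict.getD, PySem.Dict.get?_mk_cons, PySem.Dict.insert, PySem.Dict.contains]]
          rw [ih]
          simp [pvCarrier, pvCarrierPrefixes, pvCarrierGo, h1, h2]
        · by_cases h3 : PySem.Str.slice p none (some 2) ∈ ["80", "86", "88", "89"]
          · rw [show pvAStep (PySem.Dict.mk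
                [("mobicom", a), ("skytel", b), ("unitel", c), ("gmobile", d), ("other", e)]) p
                = PySem.Dict.mk [("mobicom", a), ("skytel", b), ("unitel", c ++ [p]),
                    ("gmobile", d), ("other", e)] by
                simp [pvAStep, h1, h2, h3, PySem.Dict.modify, PySem.Dict.getD, PySem.Dict.get?_mk_cons, PySem.Dict.insert, PySem.Dict.contains]]
            rw [ih]
            simp [pvCarrier, pvCarrierPrefixes, pvCarrierGo, h1, h2, h3]
          · by_cases h4 : PySem.Str.slice p none (some 2) ∈ ["93", "97", "98"]
            · rw [show pvAStep (PySem.Dict.mk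
                  [("mobicom", a), ("skytel", b), ("unitel", c), ("gmobile", d), ("other", e)]) p
                  = PySem.Dict.mk [("mobicom", a), ("skytel", b), ("unitel", c),
                      ("gmobile", d ++ [p]), ("other", e)] by
                  simp [pvAStep, h1, h2, h3, h4, PySem.Dict.modify, PySem.Dict.getD, PySem.Dict.get?_mk_cons, PySem.Dict.insert, PySem.Dict.contains]]
              rw [ih]
              simp [pvCarrier, pvCarrierPrefixes, pvCarrierGo, h1, h2, h3, h4]
            · rw [show pvAStep (PySem.Dict.mk
                  [("mobicom", a), ("skytel", b), ("unitel", c), ("gmobile", d), ("other", e)]) p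
                  = PySem.Dict.mk [("mobicom", a), ("skytel", b), ("unitel", c),
                      ("gmobile", d), ("other", e ++ [p])] by
                  simp [pvAStep, h1, h2, h3, h4, PySem.Dict.modify, PySem.Dict.getD, PySem.Dict.get?_mk_cons, PySem.Dict.insert, PySem.Dict.contains]]
              rw [ih]
              simp [pvCarrier, pvCarrierPrefixes, pvCarrierGo, h1, h2, h3, h4]

-- ===== VERDICT (by name: the statement is the Claim_ definition above) =====
set_option maxHeartbeats 1000000 in
theorem check_phone_number_spec : Claim_equal_check_phone_number := by
  intro phone_numbers _
  unfold Spec_check_phone_number check_phone_number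
  simp only []
  rw [show (((((PySem.Dict.empty.insert "mobicom" ([] : List String)).insert "skytel" []).insert
        "unitel" []).insert "gmobile" []).insert "other" [])
      = PySem.Dict.mk [("mobicom", []), ("skytel", []), ("unitel", []), ("gmobile", []),
          ("other", [])] by decide]
  rw [pvFoldA]
  simp only [check_phone_number_alt, PySem.Dict.items, List.nil_append,
    List.foldl_cons, List.foldl_nil, List.filter_cons, List.filter_nil]
  by_cases h1 : (List.filter (fun p => pvCarrier p == "mobicom") phone_numbers).isEmpty <;>
    by_cases h2 : (List.filter (fun p => pvCarrier p == "skytel") phone_numbers).isEmpty <;>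
      by_cases h3 : (List.filter (fun p => pvCarrier p == "unitel") phone_numbers).isEmpty <;>
        by_cases h4 : (List.filter (fun p => pvCarrier p == "gmobile") phone_numbers).isEmpty <;>
          by_cases h5 : (List.filter (fun p => pvCarrier p == "other") phone_numbers).isEmpty <;>
            simp [h1, h2, h3, h4, h5]
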